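-- pv_equiv track=rewrite | github.com/Swathi0607-d/Mini-SIEM-Analyzer | siem_analyzer.py | analyze_events
-- ===== SOURCE A (Python) =====
-- from collections import defaultdict
--
-- def analyze_events(events):
--     failed_by_ip      = defaultdict(int)
--     failed_users_by_ip= defaultdict(set)
--     success_by_ip     = defaultdict(int)
--     suspicious_by_ip  = defaultdict(int)
--     first_seen        = {}
--     last_seen         = {}
--
--     for event in events:
--         ip = event.get('ip', 'unknown')
--         ts = event.get('timestamp', '')
--         if ip not in first_seen:
--             first_seen[ip] = ts
--         last_seen[ip] = ts
--
--         if event['status'] == 'FAILED':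
--             failed_by_ip[ip] += 1
--             failed_users_by_ip[ip].add(event.get('user', ''))
--         elif event['status'] == 'SUCCESS':
--             success_by_ip[ip] += 1
--         elif event['status'] == 'SUSPICIOUS':
--             suspicious_by_ip[ip] += 1
--
--     return failed_by_ip, failed_users_by_ip, success_by_ip, suspicious_by_ip, first_seen, last_seen
-- ===== SOURCE B (Python) =====
-- from collections import defaultdict
--
-- def analyze_events(events):
--     # One preprocessing pass extracts (ip, status, event); each of the six
--     # outputs is then derived by its own independent pass.
--     recs = [(e.get('ip', 'unknown'), e['status'], e) for e in events]
--
--     failed_by_ip = defaultdict(int)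
--     for ip, st, _ in recs:
--         if st == 'FAILED':
--             failed_by_ip[ip] += 1
--
--     failed_users_by_ip = defaultdict(set)
--     for ip, st, e in recs:
--         if st == 'FAILED':
--             failed_users_by_ip[ip].add(e.get('user', ''))
--
--     success_by_ip = defaultdict(int)
--     for ip, st, _ in recs:
--         if st == 'SUCCESS':
--             success_by_ip[ip] += 1
--
--     suspicious_by_ip = defaultdict(int)
--     for ip, st, _ in recs:
--         if st == 'SUSPICIOUS':
--             suspicious_by_ip[ip] += 1
--
--     first_seen = {}
--     for e in events:
--         first_seen.setdefault(e.get('ip', 'unknown'), e.get('timestamp', ''))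
--
--     last_seen = dict((e.get('ip', 'unknown'), e.get('timestamp', '')) for e in events)
--
--     return failed_by_ip, failed_users_by_ip, success_by_ip, suspicious_by_ip, first_seen, last_seen
-- ===== Notes on version B (the rewrite author's own statement) =====
-- stated objective: alternative
-- what changed: A's single loop that threads six accumulators through every event is replaced by one preprocessing pass extracting (ip, status, event) records plus six independent per-output passes (per-status counting folds, a setdefault pass for first_seen, and dict() over (ip, timestamp) pairs for last_seen).
import Mathlib
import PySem

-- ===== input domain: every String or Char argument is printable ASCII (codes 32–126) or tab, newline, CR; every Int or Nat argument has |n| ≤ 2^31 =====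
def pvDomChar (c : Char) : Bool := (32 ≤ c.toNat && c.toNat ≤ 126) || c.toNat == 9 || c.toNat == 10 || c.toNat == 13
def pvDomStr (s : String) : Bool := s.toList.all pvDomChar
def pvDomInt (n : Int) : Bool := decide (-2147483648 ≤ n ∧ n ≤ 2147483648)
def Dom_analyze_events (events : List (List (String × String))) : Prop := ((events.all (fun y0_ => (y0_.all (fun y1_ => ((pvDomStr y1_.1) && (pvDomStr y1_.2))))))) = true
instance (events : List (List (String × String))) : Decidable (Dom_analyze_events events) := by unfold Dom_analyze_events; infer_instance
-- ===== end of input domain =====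

-- B replaces A's single loop carrying six accumulators by one preprocessing pass
-- extracting (ip, status, event) plus six independent per-output passes (objective: alternative decomposition).
-- Both Pythons raise KeyError when an event lacks 'status'; Pre_ excludes exactly those inputs.

-- ===== PORT A =====
-- A-side state: (failed_by_ip, failed_users_by_ip, success_by_ip, suspicious_by_ip, first_seen, last_seen)
def pvStepA (s : PySem.Dict String Int × PySem.Dict String (PySem.Set String) × PySem.Dict String Int × PySem.Dict String Int × PySem.Dict String String × PySem.Dict String String) (event : List (String × String)) : PySem.Dict String Int × PySem.Dict String (PySem.Set String) × PySem.Dict String Int × PySem.Dict String Int × PySem.Dict String String × PySem.Dict String String :=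
  let d := PySem.Dict.ofList event
  let ip := d.getD "ip" "unknown"
  let ts := d.getD "timestamp" ""
  let fs := if (s.2.2.2.2.1).contains ip then s.2.2.2.2.1 else (s.2.2.2.2.1).insert ip ts
  let ls := (s.2.2.2.2.2).insert ip ts
  let status := (d.get? "status").getD ""   -- event['status']; none (KeyError) is excluded by Pre_
  if status == "FAILED" then
    (s.1.modify ip 0 (· + 1), (s.2.1).modify ip PySem.Set.empty (fun u => PySem.Set.add u (d.getD "user" "")), s.2.2.1, s.2.2.2.1, fs, ls)
  else if status == "SUCCESS" then
    (s.1, s.2.1, (s.2.2.1).modify ip 0 (· + 1), s.2.2.2.1, fs, ls)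
  else if status == "SUSPICIOUS" then
    (s.1, s.2.1, s.2.2.1, (s.2.2.2.1).modify ip 0 (· + 1), fs, ls)
  else
    (s.1, s.2.1, s.2.2.1, s.2.2.2.1, fs, ls)

def analyze_events (events : List (List (String × String))) : (List (String × Int)) × (List (String × List String)) × (List (String × Int)) × (List (String × Int)) × (List (String × String)) × (List (String × String)) :=
  let st := events.foldl pvStepA (PySem.Dict.empty, PySem.Dict.empty, PySem.Dict.empty, PySem.Dict.empty, PySem.Dict.empty, PySem.Dict.empty)
  (st.1.items, (st.2.1).items, (st.2.2.1).items, (st.2.2.2.1).items, (st.2.2.2.2.1).items, (st.2.2.2.2.2).items)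

-- ===== PORT B =====
-- one record (ip, status, event) per event
def pvRecB (e : List (String × String)) : String × String × List (String × String) :=
  let d := PySem.Dict.ofList e
  (d.getD "ip" "unknown", (d.get? "status").getD "", e)

def analyze_events_alt (events : List (List (String × String))) : (List (String × Int)) × (List (String × List String)) × (List (String × Int)) × (List (String × Int)) × (List (String × String)) × (List (String × String)) :=
  let recs := events.map pvRecB
  let failed := recs.foldl (fun acc r => if r.2.1 == "FAILED" then acc.modify r.1 0 (· + 1) else acc) PySem.Dict.empty
  let fusers := recs.foldl (fun acc r => if r.2.1 == "FAILED" then acc.modify r.1 PySem.Set.empty (fun u => PySem.Set.add u ((PySem.Dict.ofList r.2.2).getD "user" "")) else acc) PySem.Dict.empty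
  let success := recs.foldl (fun acc r => if r.2.1 == "SUCCESS" then acc.modify r.1 0 (· + 1) else acc) PySem.Dict.empty
  let susp := recs.foldl (fun acc r => if r.2.1 == "SUSPICIOUS" then acc.modify r.1 0 (· + 1) else acc) PySem.Dict.empty
  let fs := events.foldl (fun acc e =>
      let d := PySem.Dict.ofList e
      acc.setdefault (d.getD "ip" "unknown") (d.getD "timestamp" "")) PySem.Dict.empty
  let ls := PySem.Dict.ofList (events.map (fun e =>
      let d := PySem.Dict.ofList e
      (d.getD "ip" "unknown", d.getD "timestamp" "")))
  (failed.items, fusers.items, success.items, susp.items, fs.items, ls.items)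

-- ===== PRECONDITION & SPEC =====
-- Pre_ excludes events without a 'status' key, on which the Python A (and B) raises KeyError.
def Pre_analyze_events (events : List (List (String × String))) : Prop :=
  (events.all (fun e => e.any (fun p => p.1 == "status"))) = true
instance (events : List (List (String × String))) : Decidable (Pre_analyze_events events) := by unfold Pre_analyze_events; infer_instance

def pvWitness_analyze_events : (List (List (String × String))) :=
  [[("ip", "1.2.3.4"), ("timestamp", "t1"), ("status", "FAILED"), ("user", "root")],
   [("ip", "1.2.3.4"), ("timestamp", "t2"), ("status", "SUCCESS")]]

def Spec_analyze_events (events : List (List (String × String))) (out : (List (String × Int)) × (List (String × List String)) × (List (String × Int)) × (List (String × Int)) × (List (String × String)) × (List (String × String))) : Prop := out = analyze_events_alt events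
instance (events : List (List (String × String))) (out : (List (String × Int)) × (List (String × List String)) × (List (String × Int)) × (List (String × Int)) × (List (String × String)) × (List (String × String))) : Decidable (Spec_analyze_events events out) := by
  unfold Spec_analyze_events
  letI i5 : DecidableEq (List (String × String) × List (String × String)) := inferInstance
  letI i4 : DecidableEq (List (String × Int) × List (String × String) × List (String × String)) := inferInstance
  letI i3 : DecidableEq (List (String × Int) × List (String × Int) × List (String × String) × List (String × String)) := inferInstance
  letI i2 : DecidableEq (List (String × List String) × List (String × Int) × List (String × Int) × List (String × String) × List (String × String)) := inferInstance
  infer_instance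

-- ===== CLAIM (what is proved, stated in full; the proofs are below) =====
def Claim_equal_analyze_events : Prop := ∀ (events : List (List (String × String))), Dom_analyze_events events → Pre_analyze_events events → Spec_analyze_events events (analyze_events events)

-- ===== LEMMAS AND PROOFS =====

-- A's "if ip not in first_seen: first_seen[ip] = ts" is exactly dict.setdefault.
lemma pvInsert_if_eq_setdefault {κ ν : Type} [BEq κ] (d : PySem.Dict κ ν) (k : κ) (v : ν) :
    (if d.contains k then d else d.insert k v) = d.setdefault k v := by
  simp only [PySem.Dict.insert, PySem.Dict.setdefault]
  split_ifs <;> rfl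

-- A's fused loop over a six-tuple state equals the tuple of B's six independent passes.
set_option maxHeartbeats 1600000 in
lemma pvFoldA_split (events : List (List (String × String)))
    (t : PySem.Dict String Int × PySem.Dict String (PySem.Set String) × PySem.Dict String Int × PySem.Dict String Int × PySem.Dict String String × PySem.Dict String String) :
    events.foldl pvStepA t =
      (events.foldl (fun acc e => if (pvRecB e).2.1 == "FAILED" then acc.modify (pvRecB e).1 0 (· + 1) else acc) t.1,
       events.foldl (fun acc e => if (pvRecB e).2.1 == "FAILED" then acc.modify (pvRecB e).1 PySem.Set.empty (fun u => PySem.Set.add u ((PySem.Dict.ofList (pvRecB e).2.2).getD "user" "")) else acc) t.2.1,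
       events.foldl (fun acc e => if (pvRecB e).2.1 == "SUCCESS" then acc.modify (pvRecB e).1 0 (· + 1) else acc) t.2.2.1,
       events.foldl (fun acc e => if (pvRecB e).2.1 == "SUSPICIOUS" then acc.modify (pvRecB e).1 0 (· + 1) else acc) t.2.2.2.1,
       events.foldl (fun acc e =>
         let d := PySem.Dict.ofList e
         acc.setdefault (d.getD "ip" "unknown") (d.getD "timestamp" "")) t.2.2.2.2.1,
       events.foldl (fun acc e =>
         let d := PySem.Dict.ofList e
         acc.insert (d.getD "ip" "unknown") (d.getD "timestamp" "")) t.2.2.2.2.2) := by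
  induction events generalizing t with
  | nil => rfl
  | cons e es ih =>
      have h : pvStepA t e =
          ((if (pvRecB e).2.1 == "FAILED" then (t.1).modify (pvRecB e).1 0 (· + 1) else t.1),
           (if (pvRecB e).2.1 == "FAILED" then (t.2.1).modify (pvRecB e).1 PySem.Set.empty (fun u => PySem.Set.add u ((PySem.Dict.ofList (pvRecB e).2.2).getD "user" "")) else t.2.1),
           (if (pvRecB e).2.1 == "SUCCESS" then (t.2.2.1).modify (pvRecB e).1 0 (· + 1) else t.2.2.1),
           (if (pvRecB e).2.1 == "SUSPICIOUS" then (t.2.2.2.1).modify (pvRecB e).1 0 (· + 1) else t.2.2.2.1),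
           (t.2.2.2.2.1).setdefault ((PySem.Dict.ofList e).getD "ip" "unknown") ((PySem.Dict.ofList e).getD "timestamp" ""),
           (t.2.2.2.2.2).insert ((PySem.Dict.ofList e).getD "ip" "unknown") ((PySem.Dict.ofList e).getD "timestamp" "")) := by
        simp only [pvStepA, pvRecB, pvInsert_if_eq_setdefault]
        split_ifs <;> first | rfl | (exfalso; simp_all)
      rw [List.foldl_cons, h, ih]
      rfl

set_option maxHeartbeats 1600000 in
theorem analyze_events_spec_aux (events : List (List (String × String))) :
    analyze_events events = analyze_events_alt events := by
  simp only [analyze_events, analyze_events_alt, List.foldl_map, pvFoldA_split,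
    PySem.Dict.ofList, PySem.Dict.update, List.foldl_map]

-- ===== VERDICT (by name: the statement is the Claim_ definition above) =====
theorem analyze_events_spec : Claim_equal_analyze_events := by
  intro events _ _
  exact analyze_events_spec_aux events
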